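-- pv_equiv track=rewrite | github.com/hassanamgad8/Pento | app/routes/sniper.py | parse_post_exploitation_output
-- ===== SOURCE A (Python) =====
-- def parse_post_exploitation_output(output):
--     # Simple parser to split output into sections for tabs
--     sections = {
--         'user': '', 'system': '', 'processes': '', 'hashes': '', 'filesystem': '', 'network': '', 'credentials': ''
--     }
--     current = None
--     for line in output.splitlines():
--         if 'getuid' in line or 'whoami' in line or 'id' in line:
--             current = 'user'
--         elif 'sysinfo' in line:
--             current = 'system'
--         elif 'ps' in line or 'tasklist' in line:
--             current = 'processes'
--         elif 'hashdump' in line or '/etc/shadow' in line: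
--             current = 'hashes'
--         elif 'ls' in line or 'pwd' in line:
--             current = 'filesystem'
--         elif 'ifconfig' in line or 'ipconfig' in line or 'route' in line:
--             current = 'network'
--         elif 'net user' in line:
--             current = 'credentials'
--         if current:
--             sections[current] += line + '\n'
--     return sections
-- ===== SOURCE B (Python) =====
-- SECTION_TABLE = [
--     (['getuid', 'whoami', 'id'], 'user'),
--     (['sysinfo'], 'system'),
--     (['ps', 'tasklist'], 'processes'),
--     (['hashdump', '/etc/shadow'], 'hashes'),
--     (['ls', 'pwd'], 'filesystem'),
--     (['ifconfig', 'ipconfig', 'route'], 'network'),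
--     (['net user'], 'credentials'),
-- ]
--
--
-- def _classify(line, current):
--     # First table entry (in priority order) with any keyword in the line; else keep current.
--     for keywords, name in SECTION_TABLE:
--         if any(k in line for k in keywords):
--             return name
--     return current
--
--
-- def parse_post_exploitation_output(output):
--     lines = output.splitlines()
--     labels = []
--     current = None
--     for line in lines:
--         current = _classify(line, current)
--         labels.append(current)
--     return {name: ''.join(line + '\n' for line, label in zip(lines, labels) if label == name)
--             for _, name in SECTION_TABLE}
-- ===== Notes on version B (the rewrite author's own statement) =====
-- stated objective: idiomatic
-- what changed: Replaced the single-pass elif-cascade that mutates a dict in place by a data-driven design: an ordered keyword table, a _classify helper giving each line its carried-forward section label, and a dict comprehension that groups the labeled lines per section.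
import Mathlib
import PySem

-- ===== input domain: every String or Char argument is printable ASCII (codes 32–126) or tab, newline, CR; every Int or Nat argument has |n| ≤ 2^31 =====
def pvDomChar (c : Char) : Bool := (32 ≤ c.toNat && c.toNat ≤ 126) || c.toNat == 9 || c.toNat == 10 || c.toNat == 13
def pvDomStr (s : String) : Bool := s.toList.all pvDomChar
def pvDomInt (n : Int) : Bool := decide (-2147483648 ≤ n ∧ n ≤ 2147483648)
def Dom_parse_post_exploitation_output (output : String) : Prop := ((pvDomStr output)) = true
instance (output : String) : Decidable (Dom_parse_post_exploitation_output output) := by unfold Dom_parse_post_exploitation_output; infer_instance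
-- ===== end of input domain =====

-- B replaces A's in-place elif cascade by an ordered keyword table, per-line labeling and a
-- grouping comprehension (objective: idiomatic); same return value, no side effects in either.

-- ===== PORT A =====
-- the body of A's for-loop, named so the proofs can speak about one iteration;
-- `if current:` is true exactly when current is a (always non-empty) section name, i.e. not None;
-- `sections[current]` always finds the key (the 7 keys are fixed), so `.getD ""` is never the default
def pvBodyA (st : Option String × PySem.Dict String String) (line : String) :
    Option String × PySem.Dict String String :=
  let current : Option String :=
    if PySem.Str.isIn "getuid" line || PySem.Str.isIn "whoami" line || PySem.Str.isIn "id" line then some "user"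
    else if PySem.Str.isIn "sysinfo" line then some "system"
    else if PySem.Str.isIn "ps" line || PySem.Str.isIn "tasklist" line then some "processes"
    else if PySem.Str.isIn "hashdump" line || PySem.Str.isIn "/etc/shadow" line then some "hashes"
    else if PySem.Str.isIn "ls" line || PySem.Str.isIn "pwd" line then some "filesystem"
    else if PySem.Str.isIn "ifconfig" line || PySem.Str.isIn "ipconfig" line || PySem.Str.isIn "route" line then some "network"
    else if PySem.Str.isIn "net user" line then some "credentials"
    else st.1
  let sections :=
    match current with
    | some c => PySem.Dict.insert st.2 c (((PySem.Dict.get? st.2 c).getD "") ++ (line ++ "\n"))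
    | none => st.2
  (current, sections)

def parse_post_exploitation_output (output : String) : List (String × String) :=
  let sections : PySem.Dict String String :=
    PySem.Dict.mk [("user", ""), ("system", ""), ("processes", ""), ("hashes", ""),
                   ("filesystem", ""), ("network", ""), ("credentials", "")]
  let r := (PySem.Str.splitlines output).foldl pvBodyA (none, sections)
  PySem.Dict.items r.2

-- ===== PORT B =====
def pvTable : List (List String × String) :=
  [(["getuid", "whoami", "id"], "user"),
   (["sysinfo"], "system"),
   (["ps", "tasklist"], "processes"),
   (["hashdump", "/etc/shadow"], "hashes"),
   (["ls", "pwd"], "filesystem"),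
   (["ifconfig", "ipconfig", "route"], "network"),
   (["net user"], "credentials")]

-- `_classify` in Source B: first table entry with any keyword in the line, else keep current
def pvClassifyAux (line : String) : List (List String × String) → Option String → Option String
  | [], current => current
  | (kws, name) :: rest, current =>
      if kws.any (fun k => PySem.Str.isIn k line) then some name
      else pvClassifyAux line rest current

def pvClassify (line : String) (current : Option String) : Option String :=
  pvClassifyAux line pvTable current

-- the label-building loop of Source B (current carried forward)
def pvLabels : Option String → List String → List (Option String)
  | _, [] => []
  | current, line :: rest =>
      let c := pvClassify line current
      c :: pvLabels c rest

def parse_post_exploitation_output_alt (output : String) : List (String × String) :=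
  let lines := PySem.Str.splitlines output
  let labels := pvLabels none lines
  pvTable.map (fun e =>
    (e.2, PySem.Str.join "" ((lines.zip labels).filterMap
      (fun p => if p.2 == some e.2 then some (p.1 ++ "\n") else none))))

-- ===== PRECONDITION & SPEC =====
def Spec_parse_post_exploitation_output (output : String) (out : List (String × String)) : Prop := out = parse_post_exploitation_output_alt output
instance (output : String) (out : List (String × String)) : Decidable (Spec_parse_post_exploitation_output output out) := by unfold Spec_parse_post_exploitation_output; infer_instance

-- ===== CLAIM (what is proved, stated in full; the proofs are below) =====
def Claim_equal_parse_post_exploitation_output : Prop := ∀ (output : String), Dom_parse_post_exploitation_output output → Spec_parse_post_exploitation_output output (parse_post_exploitation_output output)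

-- ===== LEMMAS AND PROOFS =====

-- the seven section names
def pvNames : List String :=
  ["user", "system", "processes", "hashes", "filesystem", "network", "credentials"]

-- what a line + carried label accumulate for section n over the rest of the input
def pvCat (n : String) : Option String → List String → String
  | _, [] => ""
  | cur, l :: ls =>
      let c := pvClassify l cur
      (if c = some n then l ++ "\n" else "") ++ pvCat n c ls

-- invariant on the carried label
def pvOk (cur : Option String) : Prop := cur = none ∨ ∃ n ∈ pvNames, cur = some n

theorem pvClassify_ok (line : String) (cur : Option String) (h : pvOk cur) :
    pvOk (pvClassify line cur) := by
  have hv : pvClassify line cur = cur ∨ ∃ n ∈ pvNames, pvClassify line cur = some n := by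
    simp only [pvClassify, pvTable, pvClassifyAux, pvNames]
    split_ifs <;> simp
  rcases hv with hv | hv
  · rw [hv]; exact h
  · exact Or.inr hv

-- A's inline elif chain computes pvClassify
theorem pvChain_eq (line : String) (cur : Option String) :
    (if PySem.Str.isIn "getuid" line || PySem.Str.isIn "whoami" line || PySem.Str.isIn "id" line then some "user"
     else if PySem.Str.isIn "sysinfo" line then some "system"
     else if PySem.Str.isIn "ps" line || PySem.Str.isIn "tasklist" line then some "processes"
     else if PySem.Str.isIn "hashdump" line || PySem.Str.isIn "/etc/shadow" line then some "hashes"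
     else if PySem.Str.isIn "ls" line || PySem.Str.isIn "pwd" line then some "filesystem"
     else if PySem.Str.isIn "ifconfig" line || PySem.Str.isIn "ipconfig" line || PySem.Str.isIn "route" line then some "network"
     else if PySem.Str.isIn "net user" line then some "credentials"
     else cur) = pvClassify line cur := by
  simp only [pvClassify, pvTable, pvClassifyAux, List.any_cons, List.any_nil,
    Bool.or_false, Bool.or_assoc]

theorem pvJoin_cons (x : String) (xs : List String) :
    PySem.Str.join "" (x :: xs) = x ++ PySem.Str.join "" xs := by
  induction xs with
  | nil => simp [PySem.Str.join, PySem.Chars.join_singleton, PySem.Chars.join_nil]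
  | cons b t ih => simp [PySem.Str.join, PySem.Chars.join_cons_cons]

-- B-side: zip-filter-join over the labels equals pvCat
theorem pvB_cat (n : String) (lines : List String) (cur : Option String) :
    PySem.Str.join "" ((lines.zip (pvLabels cur lines)).filterMap
      (fun p => if p.2 = some n then some (p.1 ++ "\n") else none)) = pvCat n cur lines := by
  induction lines generalizing cur with
  | nil => simp [pvLabels, pvCat, PySem.Str.join, PySem.Chars.join_nil]
  | cons l ls ih =>
      simp only [pvLabels, pvCat, List.zip_cons_cons, List.filterMap_cons]
      by_cases h : pvClassify l cur = some n
      · simp [h, pvJoin_cons, ih]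
      · simp [h, ih]

-- A-side: the fold over pvBodyA accumulates pvCat per key
theorem pvA_loop (lines : List String) (cur : Option String)
    (a b c d e f g : String) (hcur : pvOk cur) :
    (PySem.Dict.items (lines.foldl pvBodyA (cur,
      PySem.Dict.mk [("user", a), ("system", b), ("processes", c), ("hashes", d),
                     ("filesystem", e), ("network", f), ("credentials", g)])).2) =
    [("user", a ++ pvCat "user" cur lines), ("system", b ++ pvCat "system" cur lines),
     ("processes", c ++ pvCat "processes" cur lines), ("hashes", d ++ pvCat "hashes" cur lines),
     ("filesystem", e ++ pvCat "filesystem" cur lines), ("network", f ++ pvCat "network" cur lines),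
     ("credentials", g ++ pvCat "credentials" cur lines)] := by
  induction lines generalizing cur a b c d e f g with
  | nil => simp [pvCat]
  | cons l ls ih =>
      have hok := pvClassify_ok l cur hcur
      simp only [List.foldl_cons, pvBodyA]
      rw [pvChain_eq]
      rcases hok with hnone | ⟨n, hn, hsome⟩
      · rw [hnone]
        rw [ih none a b c d e f g (Or.inl rfl)]
        simp [pvCat, hnone]
      · simp only [pvNames, List.mem_cons, List.not_mem_nil, or_false] at hn
        rcases hn with rfl | rfl | rfl | rfl | rfl | rfl | rfl <;>
        · rw [hsome]
          simp only [PySem.Dict.insert, PySem.Dict.get?, PySem.Dict.contains,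
            List.find?, List.any_cons, List.any_nil, List.map_cons, List.map_nil]
          simp only [String.reduceBEq, Bool.or_false, Bool.or_true,
            Bool.false_eq_true, if_true, if_false, Option.map_some, Option.getD_some]
          rw [ih (some _) _ _ _ _ _ _ _ (Or.inr ⟨_, by simp [pvNames], rfl⟩)]
          simp [pvCat, hsome, String.append_assoc]

-- ===== VERDICT (by name: the statement is the Claim_ definition above) =====
theorem parse_post_exploitation_output_spec : Claim_equal_parse_post_exploitation_output := by
  intro output _
  unfold Spec_parse_post_exploitation_output
  unfold parse_post_exploitation_output parse_post_exploitation_output_alt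
  rw [pvA_loop (PySem.Str.splitlines output) none "" "" "" "" "" "" "" (Or.inl rfl)]
  simp [pvTable, pvB_cat]
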